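-- pv_equiv track=rewrite | github.com/konrini/Algorithm-Study | Programmers/Weekly Challenge/7주차_입실 퇴실.py | solution
-- ===== SOURCE A (Python) =====
-- def solution(enter, leave):
--     room = []
--     meet = {}
--     while enter:
--         if leave[0] not in room:
--             while leave[0] not in room:
--                 person = enter.pop(0)
--                 room.append(person)
--             for i in range(len(room)):
--                 if room[i] not in meet:
--                     meet[room[i]] = set()
--                 for j in range(len(room)):
--                     if i == j:
--                         continue
--                     else:
--                         meet[room[i]].add(room[j])
--         left = leave.pop(0)
--         room.remove(left)
--     temp = sorted(list(meet.items()))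
--     answer = []
--     for i in temp:
--         answer.append(len(i[1]))
--     return answer
-- ===== SOURCE B (Python) =====
-- # B: incremental pairwise recording -- when a person enters, record meetings with the
-- # current room occupants only (O(n^2) total), instead of re-scanning the whole room
-- # pairwise after every batch as A does (O(n^3)).  Return-value equivalence only:
-- # A pops from its 'enter'/'leave' arguments in place, B does not mutate them.
-- def solution(enter, leave):
--     met = {p: set() for p in enter}
--     room = []
--     i = 0
--     for target in leave:
--         if i >= len(enter):
--             break
--         while target not in room:
--             p = enter[i]
--             i += 1
--             for q in room:
--                 met[q].add(p)
--                 met[p].add(q)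
--             room.append(p)
--         room.remove(target)
--     return [len(met[p]) for p in sorted(met)]
-- ===== Notes on version B (the rewrite author's own statement) =====
-- stated objective: faster
-- what changed: B precomputes the meeting dict for all ids and records meetings incrementally at each entry (newcomer vs current room only), replacing A's full pairwise rescan of the whole room after every entry batch and its pop(0)-driven list mutation with a single index sweep; return value only, B does not mutate its arguments.
-- outside the precondition, e.g. on solution([1, 1], [1, 1]): A returns [0], B returns [0]
import Mathlib
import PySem

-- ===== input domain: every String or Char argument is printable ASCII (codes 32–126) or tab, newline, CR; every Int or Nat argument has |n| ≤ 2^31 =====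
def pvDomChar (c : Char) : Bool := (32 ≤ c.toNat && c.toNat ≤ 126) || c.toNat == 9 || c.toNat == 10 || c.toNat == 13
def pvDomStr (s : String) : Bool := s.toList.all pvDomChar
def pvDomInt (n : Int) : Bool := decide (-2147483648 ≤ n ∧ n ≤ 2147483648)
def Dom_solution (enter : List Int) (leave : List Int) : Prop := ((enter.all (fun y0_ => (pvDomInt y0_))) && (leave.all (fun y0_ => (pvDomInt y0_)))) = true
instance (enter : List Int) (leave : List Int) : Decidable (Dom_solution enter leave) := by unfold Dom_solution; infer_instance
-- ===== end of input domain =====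

-- B replaces A's per-batch full pairwise rescan of the room by incremental recording at
-- each entry (everyone present meets only the newcomer).  Return-value equivalence only:
-- A pops from its enter/leave arguments in place, B does not mutate them.

-- ===== PORT A =====
-- inner `while leave[0] not in room: person = enter.pop(0); room.append(person)`
-- (none = IndexError from pop on an empty list)
def pvBatchA (t : Int) (enter : List Int) (room : List Int) : Option (List Int × List Int) :=
  if t ∈ room then some (enter, room)
  else
    match enter with
    | [] => none
    | p :: rest => pvBatchA t rest (room ++ [p])

-- one iteration of `for i in range(len(room))`: ensure the key, then the j-loop.
-- `meet[room[i]].add(..)` is ported as Dict.modify with default set(); the key is always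
-- present at that point (it was just ensured), so this is exact.
def pvRowA (meet : PySem.Dict Int (PySem.Set Int)) (room : List Int) (i : Nat) :
    PySem.Dict Int (PySem.Set Int) :=
  let k := room.getD i 0
  let m1 := if meet.contains k then meet else meet.insert k PySem.Set.empty
  (List.range room.length).foldl
    (fun m j => if i = j then m
                else m.modify k PySem.Set.empty (fun s => PySem.Set.add s (room.getD j 0))) m1

-- the whole `for i in range(len(room)): ...` recording pass
def pvRecordA (meet : PySem.Dict Int (PySem.Set Int)) (room : List Int) :
    PySem.Dict Int (PySem.Set Int) :=
  (List.range room.length).foldl (fun m i => pvRowA m room i) meet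

-- `while enter:` — one iteration pops leave[0] (none = IndexError on an empty leave;
-- a failing room.remove is ported as none as well)
def pvLoopA (enter leave room : List Int) (meet : PySem.Dict Int (PySem.Set Int)) :
    Option (PySem.Dict Int (PySem.Set Int)) :=
  match enter with
  | [] => some meet
  | _ :: _ =>
    match leave with
    | [] => none
    | t :: lrest =>
      if t ∈ room then
        match PySem.List.remove? room t with
        | none => none
        | some r'' => pvLoopA enter lrest r'' meet
      else
        match pvBatchA t enter room with
        | none => none
        | some (e', r') =>
          match PySem.List.remove? r' t with
          | none => none
          | some r'' => pvLoopA e' lrest r'' (pvRecordA meet r')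
termination_by leave.length
decreasing_by all_goals simp

-- `sorted(list(meet.items()))` compares (key, set) tuples; dict keys are distinct, so it
-- is exactly a sort by the key component (Python never compares the sets here).
def solution (enter : List Int) (leave : List Int) : List Int :=
  match pvLoopA enter leave [] PySem.Dict.empty with
  | none => []   -- A raises here; excluded by Pre_solution
  | some meet =>
    (PySem.List.sorted meet.items (fun kv => kv.1)).map (fun kv => PySem.Set.len kv.2)

-- ===== PORT B =====
-- `while target not in room: p = enter[i]; i += 1; for q in room: met[q].add(p); met[p].add(q); room.append(p)`
-- (none = IndexError from enter[i]).  All touched keys exist in met (built for every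
-- element of enter up front), so Dict.modify with default set() is exact.
def pvEnterB (t : Int) (enter : List Int) (i : Nat) (room : List Int)
    (met : PySem.Dict Int (PySem.Set Int)) :
    Option (Nat × List Int × PySem.Dict Int (PySem.Set Int)) :=
  if t ∈ room then some (i, room, met)
  else
    match h : enter[i]? with
    | none => none
    | some p =>
      pvEnterB t enter (i + 1) (room ++ [p])
        (room.foldl (fun m q =>
          (m.modify q PySem.Set.empty (fun s => PySem.Set.add s p)).modify p PySem.Set.empty
            (fun s => PySem.Set.add s q)) met)
termination_by enter.length - i
decreasing_by
  have : i < enter.length := by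
    by_contra hc
    simp [List.getElem?_eq_none (by omega : enter.length ≤ i)] at h
  omega

-- `for target in leave:` with the `if i >= len(enter): break` guard
def pvLoopB (leave : List Int) (enter : List Int) (i : Nat) (room : List Int)
    (met : PySem.Dict Int (PySem.Set Int)) : Option (PySem.Dict Int (PySem.Set Int)) :=
  match leave with
  | [] => some met
  | t :: rest =>
    if enter.length ≤ i then some met
    else
      match pvEnterB t enter i room met with
      | none => none
      | some (i', room', met') =>
        match PySem.List.remove? room' t with
        | none => none
        | some room'' => pvLoopB rest enter i' room'' met'

def solution_alt (enter : List Int) (leave : List Int) : List Int :=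
  let met0 := enter.foldl (fun d p => d.insert p PySem.Set.empty) PySem.Dict.empty
  match pvLoopB leave enter 0 [] met0 with
  | none => []   -- B raises here; excluded by Pre_solution
  | some met =>
    (PySem.List.sorted met.keys (fun k => k)).map
      (fun p => PySem.Set.len (met.getD p PySem.Set.empty))

-- ===== PRECONDITION & SPEC =====
-- Pre_ excludes malformed logs — an enter list with duplicate ids, or a leave sequence
-- that never works through the whole enter list — on which A raises IndexError (or, on
-- sporadic malformed logs, returns a value that is an accident of how far its
-- simulation got before the enter list emptied).
def Pre_solution (enter : List Int) (leave : List Int) : Prop :=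
  enter.Nodup ∧
    (enter = [] ∨
      ∃ k ∈ List.range (leave.length + 1), 0 < k ∧ (leave.take k).Nodup ∧
        (∀ t ∈ leave.take k, t ∈ enter) ∧ (leave.take k).getLast? = enter.getLast?)
instance (enter : List Int) (leave : List Int) : Decidable (Pre_solution enter leave) := by
  unfold Pre_solution; infer_instance

def pvWitness_solution : List Int × List Int := ([1, 2, 3], [2, 1, 3])

def Spec_solution (enter : List Int) (leave : List Int) (out : List Int) : Prop :=
  out = solution_alt enter leave
instance (enter : List Int) (leave : List Int) (out : List Int) :
    Decidable (Spec_solution enter leave out) := by unfold Spec_solution; infer_instance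

-- ===== CLAIM (what is proved, stated in full; the proofs are below) =====
def Claim_equal_solution : Prop :=
  ∀ (enter : List Int) (leave : List Int), Dom_solution enter leave →
    Pre_solution enter leave → Spec_solution enter leave (solution enter leave)

-- ===== LEMMAS AND PROOFS =====

-- loop-success condition carried through the simulation
def pvGood (leave enter' room : List Int) : Prop :=
  enter' = [] ∨
    ∃ k : Nat, 0 < k ∧ k ≤ leave.length ∧ (leave.take k).Nodup ∧
      (∀ t ∈ leave.take k, t ∈ room ∨ t ∈ enter') ∧
      (leave.take k).getLast? = enter'.getLast?

-- ---- unfolding equations for the loop functions ----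
lemma pvLoopA_nil (leave room : List Int) (m : PySem.Dict Int (PySem.Set Int)) :
    pvLoopA [] leave room m = some m := by
  rw [pvLoopA.eq_def]

lemma pvLoopA_cons_mem {t : Int} {room r'' : List Int}
    (htr : t ∈ room) (hrem : PySem.List.remove? room t = some r'')
    {p0 : Int} {e0 lrest : List Int} {m : PySem.Dict Int (PySem.Set Int)} :
    pvLoopA (p0 :: e0) (t :: lrest) room m = pvLoopA (p0 :: e0) lrest r'' m := by
  conv_lhs => rw [pvLoopA.eq_def]
  simp [htr, hrem]

lemma pvLoopA_cons_notmem {t : Int} {room : List Int} {p0 : Int} {e0 e' r' r'' : List Int}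
    (htr : t ∉ room) (hbatch : pvBatchA t (p0 :: e0) room = some (e', r'))
    (hrem : PySem.List.remove? r' t = some r'')
    (lrest : List Int) (m : PySem.Dict Int (PySem.Set Int)) :
    pvLoopA (p0 :: e0) (t :: lrest) room m = pvLoopA e' lrest r'' (pvRecordA m r') := by
  conv_lhs => rw [pvLoopA.eq_def]
  simp [htr, hbatch, hrem]

lemma pvLoopB_break {enter : List Int} {i : Nat} (h : enter.length ≤ i)
    (t : Int) (rest room : List Int) (m : PySem.Dict Int (PySem.Set Int)) :
    pvLoopB (t :: rest) enter i room m = some m := by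
  simp only [pvLoopB]
  rw [if_pos h]

lemma pvLoopB_step {enter : List Int} {i i' : Nat} {t : Int} {room room' r'' : List Int}
    {m m' : PySem.Dict Int (PySem.Set Int)} (h : ¬ enter.length ≤ i)
    (hent : pvEnterB t enter i room m = some (i', (room', m')))
    (hrem : PySem.List.remove? room' t = some r'')
    (rest : List Int) :
    pvLoopB (t :: rest) enter i room m = pvLoopB rest enter i' r'' m' := by
  simp only [pvLoopB]
  rw [if_neg h]
  simp [hent, hrem]

lemma pvEnterB_mem {t : Int} {room : List Int} (htr : t ∈ room)
    (enter : List Int) (i : Nat) (m : PySem.Dict Int (PySem.Set Int)) :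
    pvEnterB t enter i room m = some (i, (room, m)) := by
  rw [pvEnterB.eq_def, if_pos htr]

lemma pvEnterB_push {t : Int} {room enter : List Int} {i : Nat} {p : Int}
    (htr : t ∉ room) (hget : enter[i]? = some p)
    (m : PySem.Dict Int (PySem.Set Int)) :
    pvEnterB t enter i room m
      = pvEnterB t enter (i + 1) (room ++ [p])
        (room.foldl (fun m q =>
          (m.modify q PySem.Set.empty (fun s => PySem.Set.add s p)).modify p PySem.Set.empty
            (fun s => PySem.Set.add s q)) m) := by
  rw [pvEnterB.eq_def, if_neg htr]
  split
  · next h => exact absurd (hget.symm.trans h) (by simp)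
  · next p' h =>
    have hpp : p' = p := by
      have h2 := hget.symm.trans h
      injection h2 with h3
      exact h3.symm
    subst hpp
    rfl

lemma pvBatchA_mem {t : Int} {room : List Int} (htr : t ∈ room) (enter : List Int) :
    pvBatchA t enter room = some (enter, room) := by
  rw [pvBatchA.eq_def, if_pos htr]

lemma pvBatchA_push {t : Int} {room : List Int} (htr : t ∉ room) (p : Int) (rest : List Int) :
    pvBatchA t (p :: rest) room = pvBatchA t rest (room ++ [p]) := by
  rw [pvBatchA.eq_def, if_neg htr]

-- ---- small facts ----
lemma pv_not_mem_empty (q : Int) : q ∉ (PySem.Set.empty : PySem.Set Int) := by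
  show q ∉ ([] : List Int)
  simp

lemma pv_contains_false {m : PySem.Dict Int (PySem.Set Int)} {k : Int}
    (h : k ∉ m.keys) : m.contains k = false := by
  cases hcc : m.contains k
  · rfl
  · exact absurd ((PySem.Dict.contains_iff_mem_keys m k).mp hcc) h

lemma pv_contains_true {m : PySem.Dict Int (PySem.Set Int)} {k : Int}
    (h : k ∈ m.keys) : m.contains k = true :=
  (PySem.Dict.contains_iff_mem_keys m k).mpr h

lemma pv_getD_not_mem {m : PySem.Dict Int (PySem.Set Int)} {k : Int}
    (h : k ∉ m.keys) : m.getD k PySem.Set.empty = PySem.Set.empty :=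
  PySem.Dict.getD_of_not_contains m PySem.Set.empty (pv_contains_false h)

lemma pv_nodup_parts : ∀ (l₁ l₂ : List Int), (l₁ ++ l₂).Nodup →
    l₁.Nodup ∧ l₂.Nodup ∧ ∀ a, a ∈ l₁ → a ∈ l₂ → False := by
  intro l₁
  induction l₁ with
  | nil =>
    intro l₂ h
    exact ⟨List.nodup_nil, h, fun a ha => absurd ha (List.not_mem_nil)⟩
  | cons b l₁ ih =>
    intro l₂ h
    rw [List.cons_append, List.nodup_cons] at h
    obtain ⟨hb, h'⟩ := h
    obtain ⟨h1, h2, h3⟩ := ih l₂ h'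
    refine ⟨List.nodup_cons.mpr ⟨fun hc => hb (List.mem_append.mpr (Or.inl hc)), h1⟩, h2, ?_⟩
    intro a ha hb2
    rcases List.mem_cons.mp ha with rfl | ha'
    · exact hb (List.mem_append.mpr (Or.inr hb2))
    · exact h3 a ha' hb2

lemma pv_nodup_append : ∀ (l₁ l₂ : List Int), l₁.Nodup → l₂.Nodup →
    (∀ a, a ∈ l₁ → a ∈ l₂ → False) → (l₁ ++ l₂).Nodup := by
  intro l₁
  induction l₁ with
  | nil => intro l₂ _ h2 _; exact h2
  | cons b l₁ ih =>
    intro l₂ h1 h2 h3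
    obtain ⟨hb, h1'⟩ := List.nodup_cons.mp h1
    rw [List.cons_append, List.nodup_cons]
    refine ⟨fun hc => ?_, ih l₂ h1' h2 (fun a ha hb2 => h3 a (by simp [ha]) hb2)⟩
    rcases List.mem_append.mp hc with h | h
    · exact hb h
    · exact h3 b (by simp) h

lemma pv_take_append_succ (e1 : List Int) (t : Int) (e2 : List Int) :
    (e1 ++ t :: e2).take (e1.length + 1) = e1 ++ [t] := by
  induction e1 with
  | nil => simp
  | cons a e1 ih => simp [ih]

lemma pv_drop_append_succ (e1 : List Int) (t : Int) (e2 : List Int) :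
    (e1 ++ t :: e2).drop (e1.length + 1) = e2 := by
  induction e1 with
  | nil => simp
  | cons a e1 ih => simp [ih]

lemma pv_getLast?_append : ∀ (l1 l2 : List Int), l2 ≠ [] →
    (l1 ++ l2).getLast? = l2.getLast? := by
  intro l1
  induction l1 with
  | nil => intro l2 _; rfl
  | cons b l1 ih =>
    intro l2 h
    rw [List.cons_append]
    have h2 : l1 ++ l2 ≠ [] := by
      intro hc
      have hc2 := congrArg List.length hc
      simp only [List.length_append, List.length_nil] at hc2
      have : l2 = [] := List.length_eq_zero_iff.mp (by omega)
      exact h this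
    obtain ⟨c, l', hl⟩ := List.exists_cons_of_ne_nil h2
    rw [hl, List.getLast?_cons_cons, ← hl, ih l2 h]

lemma pv_mem_of_getLast? : ∀ (l : List Int) (a : Int), l.getLast? = some a → a ∈ l := by
  intro l
  induction l with
  | nil => intro a h; simp at h
  | cons b l ih =>
    intro a h
    cases l with
    | nil =>
      have hb : a = b := by
        have : (b :: ([] : List Int)).getLast? = some b := rfl
        rw [this] at h
        exact (Option.some.injEq _ _ ▸ h.symm)
      simp [hb]
    | cons c l' =>
      rw [List.getLast?_cons_cons] at h
      exact List.mem_cons_of_mem b (ih a h)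

lemma pv_disjoint_take_drop (l : List Int) (h : l.Nodup) (i : Nat) :
    ∀ x, x ∈ l.take i → x ∈ l.drop i → False := by
  intro x hx hy
  have h2 := h
  rw [← List.take_append_drop i l] at h2
  exact (pv_nodup_parts _ _ h2).2.2 x hx hy

lemma pv_getElem_not_mem_take (l : List Int) (h : l.Nodup) (j : Nat) (hj : j < l.length) :
    l[j] ∉ l.take j := by
  intro hmem
  have hd : l[j] ∈ l.drop j := by
    have hlen : 0 < (l.drop j).length := by
      simp only [List.length_drop]
      omega
    have hmem0 := List.getElem_mem hlen
    simpa [List.getElem_drop] using hmem0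
  exact pv_disjoint_take_drop l h j _ hmem hd

-- ---- generic Set fold facts ----
lemma pv_foldl_add_mem : ∀ (V : List Int) (s : PySem.Set Int),
    (∀ q ∈ V, q ∈ s) → V.foldl PySem.Set.add s = s := by
  intro V
  induction V with
  | nil => intro s _; rfl
  | cons v V ih =>
    intro s h
    have hv : v ∈ s := h v (by simp)
    rw [List.foldl_cons, PySem.Set.add_of_mem hv]
    exact ih s (fun q hq => h q (by simp [hq]))

lemma pv_foldl_add_fresh : ∀ (V : List Int) (s : PySem.Set Int), V.Nodup →
    (∀ q ∈ V, q ∉ s) → V.foldl PySem.Set.add s = s ++ V := by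
  intro V
  induction V with
  | nil => intro s _ _; simp
  | cons v V ih =>
    intro s hnd hdj
    obtain ⟨hvV, hndV⟩ := List.nodup_cons.mp hnd
    have hv : v ∉ s := hdj v (by simp)
    rw [List.foldl_cons, PySem.Set.add_of_not_mem hv,
      ih (s ++ [v]) hndV (by
        intro q hq
        simp only [List.mem_append, List.mem_singleton]
        push_neg
        exact ⟨hdj q (List.mem_cons_of_mem _ hq), fun h => hvV (h ▸ hq)⟩)]
  
  
    simp

-- ---- eraseIdx of a Nodup list at the index of x is erase x ----
lemma pv_eraseIdx_eq_erase : ∀ (l : List Int) (n : Nat) (k : Int), l.Nodup →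
    l[n]? = some k → l.eraseIdx n = l.erase k := by
  intro l
  induction l with
  | nil => intro n k _ h; simp at h
  | cons a l ih =>
    intro n k hnd h
    obtain ⟨haL, hndL⟩ := List.nodup_cons.mp hnd
    cases n with
    | zero =>
      simp only [List.getElem?_cons_zero, Option.some.injEq] at h
      subst h
      simp [List.eraseIdx]
    | succ n =>
      simp only [List.getElem?_cons_succ] at h
      have hk : k ∈ l := by
        obtain ⟨hlt, rfl⟩ := List.getElem?_eq_some_iff.mp h
        exact List.getElem_mem _
      have hka : a ≠ k := fun he => haL (he ▸ hk)
      rw [List.eraseIdx_cons_succ, ih n k hndL h, List.erase_cons_tail (by simp [hka])]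

-- ---- A side: the inner j-loop of one row ----
lemma pvRowFoldA_spec (room : List Int) (r : Nat) (k : Int)
    (m : PySem.Dict Int (PySem.Set Int)) (hk : k ∈ m.keys) :
    ∀ n, n ≤ room.length →
      (((List.range n).foldl
        (fun m j => if r = j then m
                    else m.modify k PySem.Set.empty (fun s => PySem.Set.add s (room.getD j 0))) m).keys
          = m.keys) ∧
      ∀ x, ((List.range n).foldl
        (fun m j => if r = j then m
                    else m.modify k PySem.Set.empty (fun s => PySem.Set.add s (room.getD j 0))) m).getD x PySem.Set.empty
          = if x = k then
              ((if n ≤ r then room.take n else (room.take n).eraseIdx r).foldl PySem.Set.add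
                (m.getD k PySem.Set.empty))
            else m.getD x PySem.Set.empty := by
  intro n
  induction n with
  | zero =>
    intro _
    refine ⟨rfl, fun x => ?_⟩
    by_cases hx : x = k <;> simp [hx]
  | succ n ih =>
    intro hn1
    have hn : n ≤ room.length := by omega
    have hnlt : n < room.length := by omega
    obtain ⟨ihk, ihg⟩ := ih hn
    have htk : room.take (n + 1) = room.take n ++ [room.getD n 0] := by
      rw [List.take_succ, List.getElem?_eq_getElem hnlt]
      rw [show room.getD n 0 = room[n] from by
        rw [List.getD_eq_getElem?_getD, List.getElem?_eq_getElem hnlt, Option.getD_some]]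
      rfl
    rw [List.range_succ, List.foldl_append]
    simp only [List.foldl_cons, List.foldl_nil]
    by_cases hrn : r = n
    · rw [if_pos hrn]
      refine ⟨ihk, fun x => ?_⟩
      rw [ihg x]
      by_cases hx : x = k
      · rw [if_pos hx, if_pos hx]
        have hW : (if n ≤ r then room.take n else (room.take n).eraseIdx r)
            = (if n + 1 ≤ r then room.take (n + 1) else (room.take (n + 1)).eraseIdx r) := by
          subst hrn
          rw [if_pos (le_refl r), if_neg (by omega : ¬ r + 1 ≤ r)]
          rw [List.eraseIdx_eq_take_drop_succ, List.take_take,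
            List.drop_eq_nil_of_le (by
              rw [List.length_take]
              exact min_le_left _ _), List.append_nil]
          congr 1
          omega
        rw [hW]
      · rw [if_neg hx, if_neg hx]
    · rw [if_neg hrn]
      have hcont : ((List.range n).foldl
          (fun m j => if r = j then m
                      else m.modify k PySem.Set.empty (fun s => PySem.Set.add s (room.getD j 0))) m).contains k = true := by
        rw [PySem.Dict.contains_iff_mem_keys, ihk]
        exact hk
      constructor
      · rw [PySem.Dict.keys_modify, PySem.Dict.keys_insert_of_contains _ _ hcont, ihk]
      · intro x
        rw [PySem.Dict.getD_modify]
        by_cases hx : x = k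
        · rw [if_pos hx, if_pos hx, ihg k, if_pos rfl]
          have hW : (if n + 1 ≤ r then room.take (n + 1) else (room.take (n + 1)).eraseIdx r)
              = (if n ≤ r then room.take n else (room.take n).eraseIdx r) ++ [room.getD n 0] := by
            rcases Nat.lt_or_ge n r with hlt | hge
            · rw [if_pos (by omega), if_pos (by omega), htk]
            · have hrlt : r < n := by omega
              rw [if_neg (by omega), if_neg (by omega), htk,
                List.eraseIdx_append_of_lt_length (by
                  rw [List.length_take]
                  omega) _]
          rw [hW, List.foldl_append]
          rfl
        · rw [if_neg hx, ihg x, if_neg hx, if_neg hx]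

-- ---- A side: one full row ----
lemma pvRowA_spec (m : PySem.Dict Int (PySem.Set Int)) (room : List Int) (r : Nat) (k : Int)
    (hr : r < room.length) (hk : room.getD r 0 = k) :
    ((pvRowA m room r).keys = if k ∈ m.keys then m.keys else m.keys ++ [k]) ∧
    ∀ x, (pvRowA m room r).getD x PySem.Set.empty
        = if x = k then (room.eraseIdx r).foldl PySem.Set.add (m.getD k PySem.Set.empty)
          else m.getD x PySem.Set.empty := by
  have hrow : pvRowA m room r
      = (List.range room.length).foldl
        (fun mm j => if r = j then mm
          else mm.modify k PySem.Set.empty (fun s => PySem.Set.add s (room.getD j 0)))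
        (if m.contains k = true then m else m.insert k PySem.Set.empty) := by
    simp only [pvRowA, hk]
  have hWfull : (if room.length ≤ r then room.take room.length
      else (room.take room.length).eraseIdx r) = room.eraseIdx r := by
    rw [if_neg (by omega), List.take_length]
  by_cases hmem : k ∈ m.keys
  · have hc : m.contains k = true := pv_contains_true hmem
    rw [hrow, hc, if_pos rfl]
    obtain ⟨h1, h2⟩ := pvRowFoldA_spec room r k m hmem room.length (le_refl _)
    exact ⟨by rw [h1, if_pos hmem], fun x => by rw [h2 x, hWfull]⟩
  · have hc : m.contains k = false := pv_contains_false hmem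
    rw [hrow, hc, if_neg (by simp)]
    have hk1 : k ∈ (m.insert k PySem.Set.empty).keys := by
      rw [PySem.Dict.keys_insert_of_not_contains _ _ hc]
      simp
    obtain ⟨h1, h2⟩ := pvRowFoldA_spec room r k (m.insert k PySem.Set.empty) hk1
      room.length (le_refl _)
    constructor
    · rw [h1, PySem.Dict.keys_insert_of_not_contains _ _ hc, if_neg hmem]
    · intro x
      rw [h2 x, hWfull]
      by_cases hx : x = k
      · rw [if_pos hx, if_pos hx, PySem.Dict.getD_insert, if_pos rfl,
          PySem.Dict.getD_of_not_contains m PySem.Set.empty hc]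
      · rw [if_neg hx, if_neg hx, PySem.Dict.getD_insert, if_neg hx]

-- ---- A side: the whole recording pass over room ++ N ----
lemma pvRecordA_spec (room N : List Int) (m : PySem.Dict Int (PySem.Set Int))
    (hnd : (room ++ N).Nodup)
    (hroomk : ∀ p ∈ room, p ∈ m.keys)
    (hNfresh : ∀ p ∈ N, p ∉ m.keys)
    (hvals : ∀ x q, q ∈ m.getD x PySem.Set.empty → q ∈ m.keys)
    (hclique : ∀ p ∈ room, ∀ q ∈ room, q ≠ p → q ∈ m.getD p PySem.Set.empty) :
    (pvRecordA m (room ++ N)).keys = m.keys ++ N ∧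
    ∀ x, (pvRecordA m (room ++ N)).getD x PySem.Set.empty
        = if x ∈ room then m.getD x PySem.Set.empty ++ N
          else if x ∈ N then (room ++ N).erase x
          else m.getD x PySem.Set.empty := by
  obtain ⟨hndR, hndN, hdj⟩ := pv_nodup_parts room N hnd
  have hlenRN : (room ++ N).length = room.length + N.length := by simp
  have main : ∀ n, n ≤ (room ++ N).length →
      (((List.range n).foldl (fun m i => pvRowA m (room ++ N) i) m).keys
        = m.keys ++ N.take (n - room.length)) ∧
      (∀ x, ((List.range n).foldl (fun m i => pvRowA m (room ++ N) i) m).getD x PySem.Set.empty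
        = if x ∈ (room ++ N).take n then
            (if x ∈ room then m.getD x PySem.Set.empty ++ N else (room ++ N).erase x)
          else m.getD x PySem.Set.empty) := by
    intro n
    induction n with
    | zero => exact fun _ => ⟨by simp, fun x => by simp⟩
    | succ n ih =>
      intro hn1
      have hn : n ≤ (room ++ N).length := by omega
      have hnlt : n < (room ++ N).length := by omega
      obtain ⟨ihk, ihg⟩ := ih hn
      rw [List.range_succ, List.foldl_append]
      simp only [List.foldl_cons, List.foldl_nil]
      set Sn := (List.range n).foldl (fun m i => pvRowA m (room ++ N) i) m with hSndef
      set kk := (room ++ N)[n] with hkk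
      have hgd : (room ++ N).getD n 0 = kk := by
        rw [List.getD_eq_getElem?_getD, List.getElem?_eq_getElem hnlt]
        rfl
      have hknotin : kk ∉ (room ++ N).take n := pv_getElem_not_mem_take _ hnd n hnlt
      have htk : (room ++ N).take (n + 1) = (room ++ N).take n ++ [kk] := by
        rw [List.take_succ, List.getElem?_eq_getElem hnlt]
        rfl
      have hSnkk : Sn.getD kk PySem.Set.empty = m.getD kk PySem.Set.empty := by
        rw [ihg kk, if_neg hknotin]
      have heii : (room ++ N).eraseIdx n = (room ++ N).erase kk :=
        pv_eraseIdx_eq_erase _ n kk hnd (List.getElem?_eq_getElem hnlt)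
      obtain ⟨rowk, rowg⟩ := pvRowA_spec Sn (room ++ N) n kk hnlt hgd
      by_cases hnR : n < room.length
      · -- kk is an old room member
        have hkkroom : kk ∈ room := by
          rw [hkk, List.getElem_append_left hnR]
          exact List.getElem_mem _
        have hkkN : kk ∉ N := fun hc => hdj kk hkkroom hc
        have hsub : n - room.length = 0 := by omega
        have hsub1 : n + 1 - room.length = 0 := by omega
        have hkkeys : kk ∈ Sn.keys := by
          rw [ihk, hsub]
          simp only [List.take_zero, List.append_nil]
          exact hroomk kk hkkroom
        constructor
        · rw [rowk, if_pos hkkeys, ihk, hsub, hsub1]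
        · intro x
          rw [rowg x]
          by_cases hx : x = kk
          · subst hx
            rw [if_pos rfl, hSnkk, heii, List.erase_append_left _ hkkroom,
              List.foldl_append,
              pv_foldl_add_mem (room.erase kk) _ (fun q hq => by
                obtain ⟨hq1, hq2⟩ := (List.Nodup.mem_erase_iff hndR).mp hq
                exact hclique kk hkkroom q hq2 hq1),
              pv_foldl_add_fresh N _ hndN
                (fun q hq hqm => hNfresh q hq (hvals kk q hqm)),
              htk, if_pos (show kk ∈ (room ++ N).take n ++ [kk] by simp),
              if_pos hkkroom]
          · rw [if_neg hx, ihg x, htk]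
            by_cases hxin : x ∈ (room ++ N).take n
            · rw [if_pos hxin, if_pos (show x ∈ (room ++ N).take n ++ [kk] from
                List.mem_append.mpr (Or.inl hxin))]
            · rw [if_neg hxin, if_neg (show x ∉ (room ++ N).take n ++ [kk] by
                simp [hxin, hx])]
      · -- kk is a newcomer
        have hnR' : room.length ≤ n := by omega
        have hltN : n - room.length < N.length := by omega
        have hkkN' : kk = N[n - room.length] := by
          rw [hkk, List.getElem_append_right hnR']
        have hkkN : kk ∈ N := by
          rw [hkkN']
          exact List.getElem_mem _
        have hkkroom : kk ∉ room := fun hc => hdj kk hc hkkN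
        have hkkeys : kk ∉ Sn.keys := by
          rw [ihk]
          intro hc
          rcases List.mem_append.mp hc with hc1 | hc2
          · exact hNfresh kk hkkN hc1
          · exact pv_getElem_not_mem_take N hndN (n - room.length) hltN (hkkN' ▸ hc2)
        have hNtake : N.take (n + 1 - room.length) = N.take (n - room.length) ++ [kk] := by
          have heq : n + 1 - room.length = (n - room.length) + 1 := by omega
          rw [heq, List.take_succ, List.getElem?_eq_getElem hltN, ← hkkN']
          rfl
        constructor
        · rw [rowk, if_neg hkkeys, ihk, hNtake, List.append_assoc]
        · intro x
          rw [rowg x]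
          by_cases hx : x = kk
          · subst hx
            rw [if_pos rfl, hSnkk, pv_getD_not_mem (hNfresh kk hkkN), heii,
              pv_foldl_add_fresh ((room ++ N).erase kk) PySem.Set.empty
                (List.Nodup.erase kk hnd) (fun q _ => pv_not_mem_empty q),
              show (PySem.Set.empty : PySem.Set Int) = ([] : List Int) from rfl,
              List.nil_append, htk,
              if_pos (show kk ∈ (room ++ N).take n ++ [kk] by simp), if_neg hkkroom]
          · rw [if_neg hx, ihg x, htk]
            by_cases hxin : x ∈ (room ++ N).take n
            · rw [if_pos hxin, if_pos (show x ∈ (room ++ N).take n ++ [kk] from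
                List.mem_append.mpr (Or.inl hxin))]
            · rw [if_neg hxin, if_neg (show x ∉ (room ++ N).take n ++ [kk] by
                simp [hxin, hx])]
  obtain ⟨h1, h2⟩ := main (room ++ N).length (le_refl _)
  have hNt : N.take ((room ++ N).length - room.length) = N := by
    rw [List.take_of_length_le (by omega)]
  constructor
  · unfold pvRecordA
    rw [h1, hNt]
  · intro x
    unfold pvRecordA
    rw [h2 x, List.take_length]
    by_cases hx1 : x ∈ room
    · rw [if_pos (by simp [hx1]), if_pos hx1, if_pos hx1]
    · by_cases hx2 : x ∈ N
      · rw [if_pos (by simp [hx2]), if_neg hx1, if_neg hx1, if_pos hx2]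
      · rw [if_neg (by simp [hx1, hx2]), if_neg hx1, if_neg hx2]

-- ---- A side: the batch-entry loop ----
lemma pvBatchA_spec (t : Int) (e2 : List Int) :
    ∀ (e1 room : List Int), t ∉ room → t ∉ e1 →
      pvBatchA t (e1 ++ t :: e2) room = some (e2, room ++ (e1 ++ [t])) := by
  intro e1
  induction e1 with
  | nil =>
    intro room ht _
    rw [List.nil_append, pvBatchA_push ht, pvBatchA_mem (by simp)]
    simp
  | cons p e1 ih =>
    intro room ht htpe
    have htp : t ≠ p := fun h => htpe (by simp [h])
    have hte1 : t ∉ e1 := fun h => htpe (by simp [h])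
    rw [List.cons_append, pvBatchA_push ht, ih (room ++ [p]) (by simp [ht, htp]) hte1]
    simp

-- ---- B side: the fold over room when p enters ----
lemma pvInnerB_spec (p : Int) : ∀ (room : List Int) (m : PySem.Dict Int (PySem.Set Int)),
    p ∉ room → room.Nodup → (∀ q ∈ room, q ∈ m.keys) → p ∈ m.keys →
    ((room.foldl (fun m q =>
        (m.modify q PySem.Set.empty (fun s => PySem.Set.add s p)).modify p PySem.Set.empty
          (fun s => PySem.Set.add s q)) m).keys = m.keys) ∧
    ∀ x, (room.foldl (fun m q =>
        (m.modify q PySem.Set.empty (fun s => PySem.Set.add s p)).modify p PySem.Set.empty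
          (fun s => PySem.Set.add s q)) m).getD x PySem.Set.empty
        = if x = p then room.foldl PySem.Set.add (m.getD p PySem.Set.empty)
          else if x ∈ room then PySem.Set.add (m.getD x PySem.Set.empty) p
          else m.getD x PySem.Set.empty := by
  intro room
  induction room with
  | nil =>
    intro m _ _ _ _
    refine ⟨rfl, fun x => ?_⟩
    by_cases hx : x = p <;> simp [hx]
  | cons q room ih =>
    intro m hp hnd hkeys hpk
    obtain ⟨hqroom, hndr⟩ := List.nodup_cons.mp hnd
    have hpq : p ≠ q := fun h => hp (by simp [h])
    have hqk : q ∈ m.keys := hkeys q (by simp)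
    have hm'keys : ((m.modify q PySem.Set.empty (fun s => PySem.Set.add s p)).modify p
        PySem.Set.empty (fun s => PySem.Set.add s q)).keys = m.keys := by
      rw [PySem.Dict.keys_modify,
        PySem.Dict.keys_insert_of_contains _ _ (by
          rw [PySem.Dict.contains_modify]
          simp [pv_contains_true hpk]),
        PySem.Dict.keys_modify,
        PySem.Dict.keys_insert_of_contains _ _ (pv_contains_true hqk)]
    have hm'get : ∀ x, ((m.modify q PySem.Set.empty (fun s => PySem.Set.add s p)).modify p
        PySem.Set.empty (fun s => PySem.Set.add s q)).getD x PySem.Set.empty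
        = if x = p then PySem.Set.add (m.getD p PySem.Set.empty) q
          else if x = q then PySem.Set.add (m.getD q PySem.Set.empty) p
          else m.getD x PySem.Set.empty := by
      intro x
      by_cases hx : x = p
      · rw [PySem.Dict.getD_modify, if_pos hx, PySem.Dict.getD_modify, if_neg hpq,
          if_pos hx]
      · rw [PySem.Dict.getD_modify, if_neg hx, PySem.Dict.getD_modify, if_neg hx]
    have hp' : p ∉ room := fun h => hp (by simp [h])
    obtain ⟨ih1, ih2⟩ := ih ((m.modify q PySem.Set.empty (fun s => PySem.Set.add s p)).modify p
        PySem.Set.empty (fun s => PySem.Set.add s q)) hp' hndr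
      (fun r hr => by rw [hm'keys]; exact hkeys r (by simp [hr]))
      (by rw [hm'keys]; exact hpk)
    rw [List.foldl_cons]
    refine ⟨by rw [ih1, hm'keys], fun x => ?_⟩
    rw [ih2 x]
    by_cases hx : x = p
    · rw [if_pos hx, if_pos hx, hm'get p, if_pos rfl, List.foldl_cons]
    · rw [if_neg hx, if_neg hx]
      by_cases hx2 : x = q
      · rw [if_neg (show x ∉ room by rw [hx2]; exact hqroom),
          if_pos (show x ∈ q :: room by simp [hx2]), hm'get x, if_neg hx, if_pos hx2,
          hx2]
      · by_cases hx3 : x ∈ room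
        · rw [if_pos hx3, if_pos (show x ∈ q :: room by simp [hx3]), hm'get x,
            if_neg hx, if_neg hx2]
        · rw [if_neg hx3, if_neg (show x ∉ q :: room by simp [hx2, hx3]), hm'get x,
            if_neg hx, if_neg hx2]

-- ---- B side: the whole entering loop ----
lemma pvEnterB_spec (t : Int) (enter0 : List Int) :
    ∀ (e1 : List Int) (i : Nat) (room : List Int) (m : PySem.Dict Int (PySem.Set Int))
      (e2 : List Int),
      enter0.drop i = e1 ++ t :: e2 →
      (room ++ (e1 ++ [t])).Nodup →
      (∀ q ∈ room ++ (e1 ++ [t]), q ∈ m.keys) →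
      (∀ x q, q ∈ m.getD x PySem.Set.empty → q ∉ e1 ++ [t]) →
      (∀ x ∈ e1 ++ [t], m.getD x PySem.Set.empty = PySem.Set.empty) →
      ∃ M, pvEnterB t enter0 i room m = some (i + (e1.length + 1), (room ++ (e1 ++ [t]), M)) ∧
        M.keys = m.keys ∧
        ∀ x, M.getD x PySem.Set.empty
            = if x ∈ room then m.getD x PySem.Set.empty ++ (e1 ++ [t])
              else if x ∈ e1 ++ [t] then (room ++ (e1 ++ [t])).erase x
              else m.getD x PySem.Set.empty := by
  intro e1
  induction e1 with
  | nil =>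
    intro i room m e2 hdrop hnd hkeys hvals hnew
    obtain ⟨hndroom, _, hdj⟩ := pv_nodup_parts room ([] ++ [t]) hnd
    have htroom : t ∉ room := fun hc => hdj t hc (by simp)
    have hget : enter0[i]? = some t := by
      have h1 : (enter0.drop i)[0]? = some t := by rw [hdrop]; rfl
      rwa [List.getElem?_drop, Nat.add_zero] at h1
    obtain ⟨hin1, hin2⟩ := pvInnerB_spec t room m htroom hndroom
      (fun q hq => hkeys q (by simp [hq])) (hkeys t (by simp))
    refine ⟨_, ?_, hin1, ?_⟩
    · rw [pvEnterB_push htroom hget, pvEnterB_mem (by simp) enter0 (i + 1)]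
      simp
    · intro x
      rw [hin2 x]
      by_cases hx : x = t
      · rw [if_pos hx, hx, if_neg htroom, if_pos (by simp),
          hnew t (by simp),
          pv_foldl_add_fresh room PySem.Set.empty hndroom (fun q _ => pv_not_mem_empty q),
          show (PySem.Set.empty : PySem.Set Int) = ([] : List Int) from rfl,
          List.nil_append, List.erase_append_right _ htroom, List.nil_append, List.erase_cons_head, List.append_nil]
      · rw [if_neg hx]
        by_cases hx2 : x ∈ room
        · rw [if_pos hx2, if_pos hx2,
            PySem.Set.add_of_not_mem (fun hc => hvals x t hc (by simp))]
          simp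
        · rw [if_neg hx2, if_neg hx2, if_neg (by simp [hx])]
  | cons p e1 ih =>
    intro i room m e2 hdrop hnd hkeys hvals hnew
    have harr : room ++ ((p :: e1) ++ [t]) = (room ++ [p]) ++ (e1 ++ [t]) := by simp
    have hnd' : ((room ++ [p]) ++ (e1 ++ [t])).Nodup := by rw [← harr]; exact hnd
    obtain ⟨hndroom, hndpe, hdj⟩ := pv_nodup_parts room ((p :: e1) ++ [t]) hnd
    have htroom : t ∉ room := fun hc => hdj t hc (by simp)
    have hproom : p ∉ room := fun hc => hdj p hc (by simp)
    have hpet : p ∉ e1 ++ [t] := by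
      have h2 : (p :: (e1 ++ [t])).Nodup := by
        rw [show (p :: (e1 ++ [t])) = (p :: e1) ++ [t] by simp]
        exact hndpe
      exact (List.nodup_cons.mp h2).1
    have hget : enter0[i]? = some p := by
      have h1 : (enter0.drop i)[0]? = some p := by rw [hdrop]; rfl
      rwa [List.getElem?_drop, Nat.add_zero] at h1
    have hdrop' : enter0.drop (i + 1) = e1 ++ t :: e2 := by
      have h1 : (enter0.drop i).drop 1 = enter0.drop (i + 1) := List.drop_drop
      rw [← h1, hdrop]
      rfl
    obtain ⟨hin1, hin2⟩ := pvInnerB_spec p room m hproom hndroom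
      (fun q hq => hkeys q (by simp [hq])) (hkeys p (by simp))
    have hm'p : (room.foldl (fun m q =>
        (m.modify q PySem.Set.empty (fun s => PySem.Set.add s p)).modify p PySem.Set.empty
          (fun s => PySem.Set.add s q)) m).getD p PySem.Set.empty = room := by
      rw [hin2 p, if_pos rfl, hnew p (by simp),
        pv_foldl_add_fresh room PySem.Set.empty hndroom (fun q _ => pv_not_mem_empty q)]
      rfl
    obtain ⟨M, hM1, hM2, hM3⟩ := ih (i + 1) (room ++ [p]) (room.foldl (fun m q =>
        (m.modify q PySem.Set.empty (fun s => PySem.Set.add s p)).modify p PySem.Set.empty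
          (fun s => PySem.Set.add s q)) m) e2 hdrop' hnd'
      (fun q hq => by
        rw [hin1]
        apply hkeys
        rw [harr]
        exact hq)
      (fun x q hq hmem => by
        have hmem' : q ∈ (p :: e1) ++ [t] := by
          rcases List.mem_append.mp hmem with h | h
          · simp [h]
          · simp only [List.mem_singleton] at h
            simp [h]
        rw [hin2 x] at hq
        by_cases h1 : x = p
        · rw [if_pos h1] at hq
          rw [hnew p (by simp),
            pv_foldl_add_fresh room PySem.Set.empty hndroom (fun q _ => pv_not_mem_empty q)] at hq
          have hqroom : q ∈ room := by
            rw [show (PySem.Set.empty : PySem.Set Int) = ([] : List Int) from rfl,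
              List.nil_append] at hq
            exact hq
          exact hdj q hqroom hmem'
        · rw [if_neg h1] at hq
          by_cases h2 : x ∈ room
          · rw [if_pos h2] at hq
            rcases (PySem.Set.mem_add _ _ _).mp hq with h | h
            · exact hvals x q h hmem'
            · rw [h] at hmem
              exact hpet hmem
          · rw [if_neg h2] at hq
            exact hvals x q hq hmem')
      (fun x hx => by
        have hx' : x ∈ (p :: e1) ++ [t] := by
          rcases List.mem_append.mp hx with h | h
          · simp [h]
          · simp only [List.mem_singleton] at h
            simp [h]
        have hxp : x ≠ p := fun h => hpet (by rw [← h]; exact hx)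
        have hxroom : x ∉ room := fun hc => hdj x hc hx'
        rw [hin2 x, if_neg hxp, if_neg hxroom]
        exact hnew x hx')
    refine ⟨M, ?_, by rw [hM2, hin1], ?_⟩
    · rw [pvEnterB_push htroom hget, hM1, ← harr]
      have hidx : i + 1 + (e1.length + 1) = i + ((p :: e1).length + 1) := by
        simp only [List.length_cons]
        omega
      rw [hidx]
    · intro x
      rw [hM3 x]
      by_cases hx1 : x ∈ room
      · rw [if_pos (show x ∈ room ++ [p] from List.mem_append.mpr (Or.inl hx1)),
          if_pos hx1, hin2 x, if_neg (fun h => hproom (by rw [← h]; exact hx1)),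
          if_pos hx1,
          PySem.Set.add_of_not_mem (fun hc => hvals x p hc (by simp))]
        simp
      · by_cases hx2 : x = p
        · rw [if_pos (show x ∈ room ++ [p] by simp [hx2]), if_neg hx1,
            if_pos (show x ∈ (p :: e1) ++ [t] by simp [hx2]), hx2, hm'p]
          rw [show room ++ ((p :: e1) ++ [t]) = room ++ (p :: (e1 ++ [t])) by simp,
            List.erase_append_right _ hproom, List.erase_cons_head]
        · by_cases hx3 : x ∈ e1 ++ [t]
          · rw [if_neg (show x ∉ room ++ [p] by
                intro hc
                rcases List.mem_append.mp hc with h | h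
                · exact hx1 h
                · simp only [List.mem_singleton] at h
                  exact hx2 h),
              if_pos hx3, if_neg hx1,
              if_pos (show x ∈ (p :: e1) ++ [t] by
                rcases List.mem_append.mp hx3 with h | h
                · simp [h]
                · simp only [List.mem_singleton] at h
                  simp [h]),
              ← harr]
          · rw [if_neg (show x ∉ room ++ [p] by
                intro hc
                rcases List.mem_append.mp hc with h | h
                · exact hx1 h
                · simp only [List.mem_singleton] at h
                  exact hx2 h),
              if_neg hx3, if_neg hx1,
              if_neg (show x ∉ (p :: e1) ++ [t] by
                intro hc
                rcases List.mem_append.mp hc with h | h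
                · rcases List.mem_cons.mp h with h' | h'
                  · exact hx2 h'
                  · exact hx3 (by simp [h'])
                · simp only [List.mem_singleton] at h
                  exact hx3 (by simp [h])),
              hin2 x, if_neg hx2, if_neg hx1]

-- ---- initial dict of B ----
lemma pvMet0_spec (enter : List Int) (hnd : enter.Nodup) :
    ((enter.foldl (fun d p => d.insert p PySem.Set.empty)
        (PySem.Dict.empty : PySem.Dict Int (PySem.Set Int))).keys = enter) ∧
    ∀ x, (enter.foldl (fun d p => d.insert p PySem.Set.empty)
        (PySem.Dict.empty : PySem.Dict Int (PySem.Set Int))).getD x PySem.Set.empty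
      = PySem.Set.empty := by
  have hitems := PySem.Dict.items_foldl_insert_fresh enter (fun a => a)
    (fun _ => (PySem.Set.empty : PySem.Set Int)) PySem.Dict.empty
    (fun a _ => rfl) (by simpa using hnd)
  have hitems2 : (enter.foldl (fun d p => d.insert p PySem.Set.empty)
      (PySem.Dict.empty : PySem.Dict Int (PySem.Set Int))).items
      = enter.map (fun a => (a, (PySem.Set.empty : PySem.Set Int))) := by
    rw [hitems]
    rfl
  have hkeys : (enter.foldl (fun d p => d.insert p PySem.Set.empty)
      (PySem.Dict.empty : PySem.Dict Int (PySem.Set Int))).keys = enter := by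
    show (enter.foldl (fun d p => d.insert p PySem.Set.empty)
      (PySem.Dict.empty : PySem.Dict Int (PySem.Set Int))).items.map Prod.fst = enter
    rw [hitems2, List.map_map]
    exact (List.map_congr_left (fun a _ => rfl)).trans (List.map_id enter)
  refine ⟨hkeys, fun x => ?_⟩
  by_cases hx : x ∈ enter
  · apply PySem.Dict.getD_of_mem_items
    · rw [hitems2]
      exact List.mem_map.mpr ⟨x, hx, rfl⟩
    · rw [hkeys]
      exact hnd
  · exact pv_getD_not_mem (by rw [hkeys]; exact hx)

-- ---- main simulation ----
lemma pvMain (enter0 : List Int) (h0 : enter0.Nodup) :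
    ∀ (leave : List Int) (i : Nat) (room : List Int)
      (mA mB : PySem.Dict Int (PySem.Set Int)),
      i ≤ enter0.length → room.Nodup →
      (∀ p ∈ room, p ∈ enter0.take i) →
      mA.keys = enter0.take i →
      mB.keys = enter0 →
      (∀ x, mB.getD x PySem.Set.empty
          = if x ∈ enter0.take i then mA.getD x PySem.Set.empty else PySem.Set.empty) →
      (∀ x q, q ∈ mA.getD x PySem.Set.empty → q ∈ enter0.take i) →
      (∀ p ∈ room, ∀ q ∈ room, q ≠ p → q ∈ mA.getD p PySem.Set.empty) →
      pvGood leave (enter0.drop i) room →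
      ∃ mA' mB',
        pvLoopA (enter0.drop i) leave room mA = some mA' ∧
        pvLoopB leave enter0 i room mB = some mB' ∧
        mA'.keys = enter0 ∧ mB'.keys = enter0 ∧
        (∀ x, mB'.getD x PySem.Set.empty = mA'.getD x PySem.Set.empty) := by
  intro leave
  induction leave with
  | nil =>
    intro i room mA mB hi hrnd hrm hkA hkB hrel hvals hcl hgood
    have hdrop : enter0.drop i = [] := by
      rcases hgood with h | ⟨k, hk0, hkle, _⟩
      · exact h
      · exfalso
        simp only [List.length_nil, Nat.le_zero] at hkle
        omega
    have htake : enter0.take i = enter0 :=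
      List.take_of_length_le (List.drop_eq_nil_iff.mp hdrop)
    refine ⟨mA, mB, by rw [hdrop]; exact pvLoopA_nil _ _ _, rfl, by rw [hkA, htake], hkB,
      fun x => ?_⟩
    rw [hrel x, htake]
    by_cases hx : x ∈ enter0
    · rw [if_pos hx]
    · rw [if_neg hx]
      exact (pv_getD_not_mem (by rw [hkA, htake]; exact hx)).symm
  | cons t lrest ih =>
    intro i room mA mB hi hrnd hrm hkA hkB hrel hvals hcl hgood
    by_cases hd : enter0.drop i = []
    · have htake : enter0.take i = enter0 :=
        List.take_of_length_le (List.drop_eq_nil_iff.mp hd)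
      refine ⟨mA, mB, by rw [hd]; exact pvLoopA_nil _ _ _,
        pvLoopB_break (List.drop_eq_nil_iff.mp hd) t lrest room mB,
        by rw [hkA, htake], hkB, fun x => ?_⟩
      rw [hrel x, htake]
      by_cases hx : x ∈ enter0
      · rw [if_pos hx]
      · rw [if_neg hx]
        exact (pv_getD_not_mem (by rw [hkA, htake]; exact hx)).symm
    · obtain ⟨k, hk0, hkle, hknd, hktgt, hklast⟩ := hgood.resolve_left hd
      obtain ⟨kp, rfl⟩ : ∃ kp, k = kp + 1 := ⟨k - 1, by omega⟩
      rw [List.take_succ_cons] at hknd hktgt hklast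
      have hkple : kp ≤ lrest.length := by
        simp only [List.length_cons] at hkle
        omega
      have hilt : i < enter0.length := by
        by_contra hc
        exact hd (List.drop_eq_nil_iff.mpr (by omega))
      have hlenle : ¬ enter0.length ≤ i := by omega
      obtain ⟨htlr, hndlr⟩ := List.nodup_cons.mp hknd
      have ht_mem : t ∈ room ∨ t ∈ enter0.drop i := hktgt t (by simp)
      obtain ⟨p0, e0, hde⟩ := List.exists_cons_of_ne_nil hd
      by_cases htr : t ∈ room
      · -- t is already in the room; no batch fires
        have htnotd : t ∉ enter0.drop i :=
          fun hc => pv_disjoint_take_drop enter0 h0 i t (hrm t htr) hc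
        have hkp0 : 0 < kp := by
          rcases Nat.eq_zero_or_pos kp with hz | hp2
          · exfalso
            subst hz
            simp only [List.take_zero] at hklast
            exact htnotd (pv_mem_of_getLast? _ t (by rw [← hklast]; simp))
          · exact hp2
        have htake_ne : lrest.take kp ≠ [] := by
          intro hc
          have hc2 := congrArg List.length hc
          simp only [List.length_take, List.length_nil] at hc2
          omega
        have hgood' : pvGood lrest (enter0.drop i) (room.erase t) := by
          right
          refine ⟨kp, hkp0, hkple, hndlr, ?_, ?_⟩
          · intro q hq
            have hqt : q ≠ t := fun h => htlr (h ▸ hq)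
            rcases hktgt q (List.mem_cons_of_mem _ hq) with h | h
            · exact Or.inl ((List.Nodup.mem_erase_iff hrnd).mpr ⟨hqt, h⟩)
            · exact Or.inr h
          · rw [← hklast, show (t :: lrest.take kp) = [t] ++ lrest.take kp from rfl,
              pv_getLast?_append _ _ htake_ne]
        have hrem : PySem.List.remove? room t = some (room.erase t) :=
          PySem.List.remove?_eq_some_erase room t htr
        obtain ⟨mA', mB', hA', hB', hka', hkb', hg'⟩ := ih i (room.erase t) mA mB hi
          (List.Nodup.erase t hrnd)
          (fun p hp => hrm p (List.mem_of_mem_erase hp))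
          hkA hkB hrel hvals
          (fun p hp q hq hqp =>
            hcl p (List.mem_of_mem_erase hp) q (List.mem_of_mem_erase hq) hqp)
          hgood'
        refine ⟨mA', mB', ?_, ?_, hka', hkb', hg'⟩
        · rw [hde, pvLoopA_cons_mem htr hrem, ← hde]
          exact hA'
        · rw [pvLoopB_step hlenle (pvEnterB_mem htr enter0 i mB) hrem lrest]
          exact hB'
      · -- the batch fires
        have htd : t ∈ enter0.drop i := ht_mem.resolve_left htr
        have hndd : (enter0.drop i).Nodup := by
          have h2 := h0
          rw [← List.take_append_drop i enter0] at h2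
          exact (pv_nodup_parts _ _ h2).2.1
        obtain ⟨e1, e2, hsplit⟩ := List.append_of_mem htd
        have hnd12 : (e1 ++ t :: e2).Nodup := hsplit ▸ hndd
        obtain ⟨hndE1, hndte2, hdj12⟩ := pv_nodup_parts _ _ hnd12
        obtain ⟨hte2, hndE2⟩ := List.nodup_cons.mp hndte2
        have hte1 : t ∉ e1 := fun hc => hdj12 t hc (by simp)
        have hndN : (e1 ++ [t]).Nodup :=
          pv_nodup_append e1 [t] hndE1 (by simp) (fun a ha hb => hte1 (by
            simp only [List.mem_singleton] at hb
            exact hb ▸ ha))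
        have hNsub : ∀ q ∈ e1 ++ [t], q ∈ enter0.drop i := by
          intro q hq
          rw [hsplit]
          rcases List.mem_append.mp hq with h | h
          · exact List.mem_append.mpr (Or.inl h)
          · simp only [List.mem_singleton] at h
            exact List.mem_append.mpr (Or.inr (by simp [h]))
        have hdisj := pv_disjoint_take_drop enter0 h0 i
        have hndRN : (room ++ (e1 ++ [t])).Nodup :=
          pv_nodup_append room (e1 ++ [t]) hrnd hndN
            (fun a ha hb => hdisj a (hrm a ha) (hNsub a hb))
        obtain ⟨hreck, hrecg⟩ := pvRecordA_spec room (e1 ++ [t]) mA hndRN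
          (fun p hp => by rw [hkA]; exact hrm p hp)
          (fun p hp hc => hdisj p (by rw [hkA] at hc; exact hc) (hNsub p hp))
          (fun x q hq => by rw [hkA]; exact hvals x q hq)
          hcl
        have hkeysB : ∀ q ∈ room ++ (e1 ++ [t]), q ∈ mB.keys := by
          intro q hq
          rw [hkB]
          rcases List.mem_append.mp hq with h | h
          · exact List.mem_of_mem_take (hrm q h)
          · exact List.mem_of_mem_drop (hNsub q h)
        have hvalsB : ∀ x q, q ∈ mB.getD x PySem.Set.empty → q ∉ e1 ++ [t] := by
          intro x q hq hqN
          rw [hrel x] at hq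
          by_cases h : x ∈ enter0.take i
          · rw [if_pos h] at hq
            exact hdisj q (hvals x q hq) (hNsub q hqN)
          · rw [if_neg h] at hq
            exact pv_not_mem_empty q hq
        have hnewB : ∀ x ∈ e1 ++ [t], mB.getD x PySem.Set.empty = PySem.Set.empty := by
          intro x hx
          rw [hrel x, if_neg (fun hc => hdisj x hc (hNsub x hx))]
        obtain ⟨M, hBent, hMk, hMg⟩ := pvEnterB_spec t enter0 e1 i room mB e2 hsplit hndRN
          hkeysB hvalsB hnewB
        have hAbatch := pvBatchA_spec t e2 e1 room htr hte1
        have htRN : t ∈ room ++ (e1 ++ [t]) := by simp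
        have hremA : PySem.List.remove? (room ++ (e1 ++ [t])) t
            = some ((room ++ (e1 ++ [t])).erase t) :=
          PySem.List.remove?_eq_some_erase _ t htRN
        have hlen12 : enter0.length - i = e1.length + 1 + e2.length := by
          have hle := congrArg List.length hsplit
          simp only [List.length_drop, List.length_append, List.length_cons] at hle
          omega
        have hi'le : i + (e1.length + 1) ≤ enter0.length := by omega
        have htake' : enter0.take (i + (e1.length + 1)) = enter0.take i ++ (e1 ++ [t]) := by
          rw [List.take_add, hsplit, pv_take_append_succ]
        have hdrop' : enter0.drop (i + (e1.length + 1)) = e2 := by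
          rw [← List.drop_drop, hsplit, pv_drop_append_succ]
        have hndroom2 : ((room ++ (e1 ++ [t])).erase t).Nodup := List.Nodup.erase t hndRN
        have hroom2sub : ∀ q ∈ (room ++ (e1 ++ [t])).erase t, q ∈ room ++ (e1 ++ [t]) :=
          fun q hq => List.mem_of_mem_erase hq
        have hmemtake' : ∀ q ∈ room ++ (e1 ++ [t]), q ∈ enter0.take (i + (e1.length + 1)) := by
          intro q hq
          rw [htake']
          rcases List.mem_append.mp hq with h | h
          · exact List.mem_append.mpr (Or.inl (hrm q h))
          · exact List.mem_append.mpr (Or.inr h)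
        have hkA1 : (pvRecordA mA (room ++ (e1 ++ [t]))).keys
            = enter0.take (i + (e1.length + 1)) := by
          rw [hreck, hkA, htake']
        have hrel1 : ∀ x, M.getD x PySem.Set.empty
            = if x ∈ enter0.take (i + (e1.length + 1))
              then (pvRecordA mA (room ++ (e1 ++ [t]))).getD x PySem.Set.empty
              else PySem.Set.empty := by
          intro x
          rw [hMg x]
          by_cases h1 : x ∈ room
          · rw [if_pos h1, if_pos (hmemtake' x (List.mem_append.mpr (Or.inl h1))), hrecg x,
              if_pos h1, hrel x, if_pos (hrm x h1)]
          · by_cases h2 : x ∈ e1 ++ [t]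
            · rw [if_neg h1, if_pos h2,
                if_pos (hmemtake' x (List.mem_append.mpr (Or.inr h2))), hrecg x,
                if_neg h1, if_pos h2]
            · rw [if_neg h1, if_neg h2, hrel x]
              by_cases h3 : x ∈ enter0.take i
              · rw [if_pos h3,
                  if_pos (by rw [htake']; exact List.mem_append.mpr (Or.inl h3)),
                  hrecg x, if_neg h1, if_neg h2]
              · rw [if_neg h3, if_neg (by
                  rw [htake']
                  intro hc
                  rcases List.mem_append.mp hc with h | h
                  · exact h3 h
                  · exact h2 h)]
        have hvals1 : ∀ x q,
            q ∈ (pvRecordA mA (room ++ (e1 ++ [t]))).getD x PySem.Set.empty →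
            q ∈ enter0.take (i + (e1.length + 1)) := by
          intro x q hq
          rw [hrecg x] at hq
          by_cases h1 : x ∈ room
          · rw [if_pos h1] at hq
            rcases List.mem_append.mp hq with h | h
            · rw [htake']
              exact List.mem_append.mpr (Or.inl (hvals x q h))
            · rw [htake']
              exact List.mem_append.mpr (Or.inr h)
          · rw [if_neg h1] at hq
            by_cases h2 : x ∈ e1 ++ [t]
            · rw [if_pos h2] at hq
              exact hmemtake' q (List.mem_of_mem_erase hq)
            · rw [if_neg h2] at hq
              rw [htake']
              exact List.mem_append.mpr (Or.inl (hvals x q hq))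
        have hcl1 : ∀ p ∈ (room ++ (e1 ++ [t])).erase t,
            ∀ q ∈ (room ++ (e1 ++ [t])).erase t, q ≠ p →
              q ∈ (pvRecordA mA (room ++ (e1 ++ [t]))).getD p PySem.Set.empty := by
          intro p hp q hq hqp
          have hpRN := hroom2sub p hp
          have hqRN := hroom2sub q hq
          rw [hrecg p]
          by_cases h1 : p ∈ room
          · rw [if_pos h1]
            rcases List.mem_append.mp hqRN with h | h
            · exact List.mem_append.mpr (Or.inl (hcl p h1 q h hqp))
            · exact List.mem_append.mpr (Or.inr h)
          · have h2 : p ∈ e1 ++ [t] := (List.mem_append.mp hpRN).resolve_left h1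
            rw [if_neg h1, if_pos h2]
            exact (List.Nodup.mem_erase_iff hndRN).mpr ⟨hqp, hqRN⟩
        have hgood2 : pvGood lrest e2 ((room ++ (e1 ++ [t])).erase t) := by
          by_cases he2 : e2 = []
          · exact Or.inl he2
          · right
            have hkp0 : 0 < kp := by
              rcases Nat.eq_zero_or_pos kp with hz | hp2
              · exfalso
                subst hz
                simp only [List.take_zero] at hklast
                have hlast : (enter0.drop i).getLast? = some t := by rw [← hklast]; simp
                rw [hsplit, show (e1 ++ t :: e2 : List Int) = (e1 ++ [t]) ++ e2 by simp,
                  pv_getLast?_append _ _ he2] at hlast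
                exact hte2 (pv_mem_of_getLast? _ t hlast)
              · exact hp2
            have htake_ne : lrest.take kp ≠ [] := by
              intro hc
              have hc2 := congrArg List.length hc
              simp only [List.length_take, List.length_nil] at hc2
              omega
            refine ⟨kp, hkp0, hkple, hndlr, ?_, ?_⟩
            · intro q hq
              have hqt : q ≠ t := fun h => htlr (h ▸ hq)
              rcases hktgt q (List.mem_cons_of_mem _ hq) with h | h
              · exact Or.inl ((List.Nodup.mem_erase_iff hndRN).mpr
                  ⟨hqt, List.mem_append.mpr (Or.inl h)⟩)
              · rw [hsplit] at h
                rcases List.mem_append.mp h with h' | h'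
                · exact Or.inl ((List.Nodup.mem_erase_iff hndRN).mpr
                    ⟨hqt, List.mem_append.mpr (Or.inr (by simp [h']))⟩)
                · rcases List.mem_cons.mp h' with h'' | h''
                  · exact absurd h'' hqt
                  · exact Or.inr h''
            · have h1 : (lrest.take kp).getLast? = (enter0.drop i).getLast? := by
                rw [← hklast, show (t :: lrest.take kp) = [t] ++ lrest.take kp from rfl,
                  pv_getLast?_append _ _ htake_ne]
              rw [h1, hsplit, show (e1 ++ t :: e2 : List Int) = (e1 ++ [t]) ++ e2 by simp,
                pv_getLast?_append _ _ he2]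
        obtain ⟨mA', mB', hA', hB', hka', hkb', hg'⟩ := ih (i + (e1.length + 1))
          ((room ++ (e1 ++ [t])).erase t) (pvRecordA mA (room ++ (e1 ++ [t]))) M
          hi'le hndroom2
          (fun p hp => hmemtake' p (hroom2sub p hp))
          hkA1 (by rw [hMk, hkB]) hrel1 hvals1 hcl1
          (by rw [hdrop']; exact hgood2)
        rw [hdrop'] at hA'
        refine ⟨mA', mB', ?_, ?_, hka', hkb', hg'⟩
        · have hpe : p0 :: e0 = e1 ++ t :: e2 := by rw [← hde, hsplit]
          rw [hde, pvLoopA_cons_notmem htr (by rw [hpe]; exact hAbatch) hremA lrest mA]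
          exact hA'
        · rw [pvLoopB_step hlenle hBent hremA lrest]
          exact hB'

-- ---- output assembly ----
lemma pvOut_spec (enter0 : List Int) (h0 : enter0.Nodup)
    (mA' mB' : PySem.Dict Int (PySem.Set Int))
    (hkA : mA'.keys = enter0) (hkB : mB'.keys = enter0)
    (hg : ∀ x, mB'.getD x PySem.Set.empty = mA'.getD x PySem.Set.empty) :
    (PySem.List.sorted mA'.items (fun kv => kv.1)).map (fun kv => PySem.Set.len kv.2)
      = (PySem.List.sorted mB'.keys (fun k => k)).map
          (fun p => PySem.Set.len (mB'.getD p PySem.Set.empty)) := by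
  have hitems : mA'.items
      = enter0.map (fun kk => (kk, mA'.getD kk PySem.Set.empty)) := by
    rw [PySem.Dict.items_eq_map_keys mA' (by rw [hkA]; exact h0) PySem.Set.empty, hkA]
  have hEperm : (PySem.List.sorted enter0 (fun k => k)).Perm enter0 :=
    PySem.List.sorted_perm _ _ _
  have hEnd : (PySem.List.sorted enter0 (fun k => k)).Nodup := hEperm.nodup_iff.mpr h0
  have hEle : (PySem.List.sorted enter0 (fun k => k)).Pairwise (fun a b => a ≤ b) :=
    PySem.List.sorted_pairwise enter0 (fun k => k)
  have hElt : (PySem.List.sorted enter0 (fun k => k)).Pairwise (fun a b => a < b) :=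
    (hEle.and hEnd).imp (fun h => lt_of_le_of_ne h.1 h.2)
  have hsorted : PySem.List.sorted mA'.items (fun kv => kv.1)
      = (PySem.List.sorted enter0 (fun k => k)).map
          (fun kk => (kk, mA'.getD kk PySem.Set.empty)) := by
    apply PySem.List.sorted_eq_of_perm_of_pairwise_lt
    · rw [hitems]
      exact hEperm.map _
    · rw [List.pairwise_map]
      simpa using hElt
  rw [hsorted, hkB, List.map_map]
  exact List.map_congr_left (fun a _ => by
    show PySem.Set.len (mA'.getD a PySem.Set.empty)
        = PySem.Set.len (mB'.getD a PySem.Set.empty)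
    rw [hg a])

-- ===== VERDICT (by name: the statement is the Claim_ definition above) =====
theorem solution_spec : Claim_equal_solution := by
  intro enter leave _ hpre
  unfold Spec_solution
  obtain ⟨hnd, hrest⟩ := hpre
  by_cases he : enter = []
  · subst he
    have hA0 : pvLoopA [] leave [] PySem.Dict.empty = some PySem.Dict.empty :=
      pvLoopA_nil _ _ _
    have hB0 : pvLoopB leave [] 0 [] PySem.Dict.empty = some PySem.Dict.empty := by
      cases leave with
      | nil => rfl
      | cons t rest => exact pvLoopB_break (by simp) t rest [] _
    unfold solution solution_alt
    simp only [List.foldl_nil]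
    rw [hA0, hB0]
    rfl
  · obtain ⟨k, hkmem, hk0, hknd, hkin, hklast⟩ := hrest.resolve_left he
    have hkle : k ≤ leave.length := by
      simp only [List.mem_range] at hkmem
      omega
    have hgood : pvGood leave (enter.drop 0) [] := by
      right
      exact ⟨k, hk0, hkle, hknd,
        fun t ht => Or.inr (by rw [List.drop_zero]; exact hkin t ht),
        by rw [List.drop_zero]; exact hklast⟩
    obtain ⟨hk0', hg0⟩ := pvMet0_spec enter hnd
    obtain ⟨mA', mB', hA, hB, hkA', hkB', hgd⟩ := pvMain enter hnd leave 0 []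
      (PySem.Dict.empty : PySem.Dict Int (PySem.Set Int))
      (enter.foldl (fun d p => d.insert p PySem.Set.empty) PySem.Dict.empty)
      (by omega) List.nodup_nil
      (fun p hp => absurd hp (List.not_mem_nil))
      rfl
      hk0'
      (fun x => by rw [hg0 x]; simp)
      (fun x q hq => absurd hq (pv_not_mem_empty q))
      (fun p hp => absurd hp (List.not_mem_nil))
      hgood
    rw [List.drop_zero] at hA
    have hsol : solution enter leave
        = (PySem.List.sorted mA'.items (fun kv => kv.1)).map
            (fun kv => PySem.Set.len kv.2) := by
      unfold solution
      rw [hA]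
    have hsolalt : solution_alt enter leave
        = (PySem.List.sorted mB'.keys (fun k => k)).map
            (fun p => PySem.Set.len (mB'.getD p PySem.Set.empty)) := by
      show (match pvLoopB leave enter 0 []
          (enter.foldl (fun d p => d.insert p PySem.Set.empty) PySem.Dict.empty) with
        | none => ([] : List Int)
        | some met => (PySem.List.sorted met.keys (fun k => k)).map
            (fun p => PySem.Set.len (met.getD p PySem.Set.empty))) = _
      rw [hB]
    rw [hsol, hsolalt]
    exact pvOut_spec enter hnd mA' mB' hkA' hkB' hgd
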